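-- pv_equiv track=rewrite | github.com/gargshalabh123/BRE | backend/analyzers/enhanced_dependency_analyzer.py | _find_all_paths_bfs
-- ===== SOURCE A (Python) =====
-- from typing import Dict, List, Any, Optional, Set
-- from collections import defaultdict, deque
--
-- def _find_all_paths_bfs(start: int, graph: Dict, max_depth: int = 10) -> Dict[int, List[int]]:
--     """Find shortest paths from start to all reachable nodes using BFS"""
--     visited = {start: [start]}
--     queue = deque([(start, [start])])
--
--     while queue:
--         node, path = queue.popleft()
--
--         if len(path) > max_depth:
--             continue
--
--         for neighbor in graph.get(node, []):
--             if neighbor not in visited: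
--                 new_path = path + [neighbor]
--                 visited[neighbor] = new_path
--                 queue.append((neighbor, new_path))
--
--     return visited
-- ===== SOURCE B (Python) =====
-- from collections import deque
--
-- def _find_all_paths_bfs(start: int, graph, max_depth: int = 10):
--     """BFS with parent/depth maps; paths reconstructed once at the end."""
--     parent = {start: None}
--     depth = {start: 1}
--     order = [start]
--     queue = deque([start])
--
--     while queue:
--         node = queue.popleft()
--         if depth[node] > max_depth:
--             continue
--         for neighbor in graph.get(node, []):
--             if neighbor not in parent:
--                 parent[neighbor] = node
--                 depth[neighbor] = depth[node] + 1
--                 order.append(neighbor)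
--                 queue.append(neighbor)
--
--     result = {}
--     for node in order:
--         path = []
--         cur = node
--         while cur is not None:
--             path.append(cur)
--             cur = parent[cur]
--         path.reverse()
--         result[node] = path
--     return result
-- ===== Notes on version B (the rewrite author's own statement) =====
-- stated objective: alternative
-- what changed: Instead of materializing and copying a full path list for every discovered node inside the BFS loop, B's BFS keeps only parent-pointer and depth maps plus a discovery-order list, and reconstructs each node's path once after the traversal by walking parent pointers back to start and reversing.
import Mathlib
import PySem

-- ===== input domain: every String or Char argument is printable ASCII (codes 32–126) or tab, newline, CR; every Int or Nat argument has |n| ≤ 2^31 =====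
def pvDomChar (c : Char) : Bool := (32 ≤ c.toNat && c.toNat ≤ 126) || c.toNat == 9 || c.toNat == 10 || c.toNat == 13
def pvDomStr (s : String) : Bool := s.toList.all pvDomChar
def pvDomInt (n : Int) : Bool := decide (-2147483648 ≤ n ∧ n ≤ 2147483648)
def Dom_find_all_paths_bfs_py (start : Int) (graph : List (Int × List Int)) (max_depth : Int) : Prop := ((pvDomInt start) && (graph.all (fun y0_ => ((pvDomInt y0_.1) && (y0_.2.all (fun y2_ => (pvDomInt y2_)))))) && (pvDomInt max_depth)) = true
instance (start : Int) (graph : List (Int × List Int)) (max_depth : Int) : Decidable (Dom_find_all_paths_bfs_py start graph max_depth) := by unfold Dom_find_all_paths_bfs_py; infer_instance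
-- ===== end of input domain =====

-- B replaces materialized per-node paths during BFS by parent/depth maps and reconstructs all
-- paths once after the traversal (objective: alternative decomposition; same output, same order).


-- ===== PORT A =====
-- fuel bound for the while loop: every queue entry but the first corresponds to one
-- neighbour occurrence in the graph, so pops ≤ 1 + total adjacency size (a totality guard only)
def pvFuelA (graph : List (Int × List Int)) : Nat := (graph.flatMap Prod.snd).length + 1

-- the while loop of A: state = (visited, queue of (node, path))
def goA (g : PySem.Dict Int (List Int)) (max_depth : Int) :
    Nat → PySem.Dict Int (List Int) → List (Int × List Int) → PySem.Dict Int (List Int)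
  | 0, visited, _ => visited
  | _ + 1, visited, [] => visited
  | fuel + 1, visited, (node, path) :: rest =>
    if (path.length : Int) > max_depth then
      goA g max_depth fuel visited rest
    else
      -- for neighbor in graph.get(node, []): if neighbor not in visited: …
      let s := (g.getD node []).foldl
        (fun (acc : PySem.Dict Int (List Int) × List (Int × List Int)) neighbor =>
          if acc.1.contains neighbor then acc
          else (acc.1.insert neighbor (path ++ [neighbor]),
                acc.2 ++ [(neighbor, path ++ [neighbor])]))
        (visited, rest)
      goA g max_depth fuel s.1 s.2

def find_all_paths_bfs_py (start : Int) (graph : List (Int × List Int)) (max_depth : Int) : List (Int × List Int) :=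
  (goA (PySem.Dict.ofList graph) max_depth (pvFuelA graph)
    (PySem.Dict.empty.insert start [start]) [(start, [start])]).items

-- ===== PORT B =====
-- fuel bound for B's while loop (same totality argument, written from B's loop)
def pvFuelB (graph : List (Int × List Int)) : Nat :=
  graph.foldl (fun a p => a + p.2.length) 0 + 1

-- path reconstruction: while cur is not None: path.append(cur); cur = parent[cur]
-- (fuel = dict size + 1 is a totality guard; parent chains are acyclic in BFS)
def walkB (parent : PySem.Dict Int (Option Int)) :
    Nat → Option Int → List Int → List Int
  | 0, _, path => path
  | _ + 1, none, path => path
  | fuel + 1, some cur, path => walkB parent fuel (parent.getD cur none) (path ++ [cur])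

-- the while loop of B: state = (parent, depth, order), queue of nodes
def goB (g : PySem.Dict Int (List Int)) (max_depth : Int) :
    Nat → PySem.Dict Int (Option Int) → PySem.Dict Int Int → List Int → List Int →
      PySem.Dict Int (Option Int) × PySem.Dict Int Int × List Int
  | 0, parent, depth, order, _ => (parent, depth, order)
  | _ + 1, parent, depth, order, [] => (parent, depth, order)
  | fuel + 1, parent, depth, order, node :: rest =>
    if depth.getD node 0 > max_depth then
      goB g max_depth fuel parent depth order rest
    else
      let s := (g.getD node []).foldl
        (fun (acc : (PySem.Dict Int (Option Int) × PySem.Dict Int Int × List Int) × List Int) nb =>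
          if acc.1.1.contains nb then acc
          else ((acc.1.1.insert nb (some node),
                 acc.1.2.1.insert nb (acc.1.2.1.getD node 0 + 1),
                 acc.1.2.2 ++ [nb]),
                acc.2 ++ [nb]))
        ((parent, depth, order), rest)
      goB g max_depth fuel s.1.1 s.1.2.1 s.1.2.2 s.2

def find_all_paths_bfs_py_alt (start : Int) (graph : List (Int × List Int)) (max_depth : Int) : List (Int × List Int) :=
  let g := PySem.Dict.ofList graph
  let st := goB g max_depth (pvFuelB graph)
    (PySem.Dict.empty.insert start none) (PySem.Dict.empty.insert start 1) [start] [start]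
  let parent := st.1
  ((st.2.2).foldl
    (fun (res : PySem.Dict Int (List Int)) n =>
      res.insert n (walkB parent (parent.size + 1) (some n) []).reverse)
    PySem.Dict.empty).items

-- ===== PRECONDITION & SPEC =====
def Spec_find_all_paths_bfs_py (start : Int) (graph : List (Int × List Int)) (max_depth : Int) (out : List (Int × List Int)) : Prop := out = find_all_paths_bfs_py_alt start graph max_depth
instance (start : Int) (graph : List (Int × List Int)) (max_depth : Int) (out : List (Int × List Int)) : Decidable (Spec_find_all_paths_bfs_py start graph max_depth out) := by unfold Spec_find_all_paths_bfs_py; infer_instance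

-- ===== CLAIM (what is proved, stated in full; the proofs are below) =====
def Claim_equal_find_all_paths_bfs_py : Prop := ∀ (start : Int) (graph : List (Int × List Int)) (max_depth : Int), Dom_find_all_paths_bfs_py start graph max_depth → Spec_find_all_paths_bfs_py start graph max_depth (find_all_paths_bfs_py start graph max_depth)

-- ===== LEMMAS AND PROOFS =====

-- the reversed path is a parent chain: each element's parent entry names the next, ending at a root
def ChainRev (parent : PySem.Dict Int (Option Int)) : List Int → Prop
  | [] => False
  | [n] => parent.get? n = some none
  | n :: m :: rest => parent.get? n = some (some m) ∧ ChainRev parent (m :: rest)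

-- invariant tying A's visited dict to B's (parent, depth, order) state
def InvS (visited : PySem.Dict Int (List Int)) (parent : PySem.Dict Int (Option Int))
    (depth : PySem.Dict Int Int) (order : List Int) : Prop :=
  visited.items.map Prod.fst = order ∧
  parent.keys = order ∧
  order.Nodup ∧
  (∀ n p, (n, p) ∈ visited.items →
    ChainRev parent p.reverse ∧ p.reverse.head? = some n ∧
    p.Nodup ∧ (∀ x ∈ p, x ∈ order) ∧ depth.getD n 0 = (p.length : Int))

-- invariant tying A's queue of (node, path) to B's queue of nodes
def InvQ (visited : PySem.Dict Int (List Int)) (qA : List (Int × List Int)) (qB : List Int) : Prop :=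
  qA.map Prod.fst = qB ∧ ∀ n p, (n, p) ∈ qA → visited.get? n = some p

lemma chainrev_insert (parent : PySem.Dict Int (Option Int)) (nb : Int) (w : Option Int) :
    ∀ l : List Int, ChainRev parent l → (∀ x ∈ l, x ≠ nb) → ChainRev (parent.insert nb w) l
  | [], hc, _ => hc.elim
  | [n], hc, hnb => by
      simp only [ChainRev] at hc ⊢
      rw [PySem.Dict.get?_insert_of_ne _ _ (hnb n (by simp))]
      exact hc
  | n :: m :: rest, hc, hnb => by
      simp only [ChainRev] at hc ⊢
      refine ⟨?_, chainrev_insert parent nb w (m :: rest) hc.2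
        (fun x hx => hnb x (List.mem_cons_of_mem _ hx))⟩
      rw [PySem.Dict.get?_insert_of_ne _ _ (hnb n (by simp))]
      exact hc.1

lemma walkB_chain (parent : PySem.Dict Int (Option Int)) :
    ∀ (l : List Int) (n : Int) (fuel : Nat) (acc : List Int),
      ChainRev parent (n :: l) → (n :: l).length ≤ fuel →
      walkB parent fuel (some n) acc = acc ++ n :: l := by
  intro l
  induction l with
  | nil =>
    intro n fuel acc hc hf
    simp only [ChainRev] at hc
    obtain ⟨f, rfl⟩ : ∃ f, fuel = f + 1 := ⟨fuel - 1, by simp at hf; omega⟩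
    simp only [walkB, PySem.Dict.getD_of_get?_eq_some parent none hc]
    cases f <;> simp [walkB]
  | cons m rest ih =>
    intro n fuel acc hc hf
    simp only [ChainRev] at hc
    obtain ⟨f, rfl⟩ : ∃ f, fuel = f + 1 := ⟨fuel - 1, by simp at hf; omega⟩
    simp only [walkB, PySem.Dict.getD_of_get?_eq_some parent none hc.1]
    rw [ih m f (acc ++ [n]) hc.2 (by simp at hf ⊢; omega)]
    simp

-- the end-of-run correspondence: reconstructing every recorded node's path yields visited
lemma reconstruct_eq (visited : PySem.Dict Int (List Int)) (parent : PySem.Dict Int (Option Int))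
    (depth : PySem.Dict Int Int) (order : List Int) (h : InvS visited parent depth order) :
    (order.foldl
      (fun (res : PySem.Dict Int (List Int)) n =>
        res.insert n (walkB parent (parent.size + 1) (some n) []).reverse)
      PySem.Dict.empty).items = visited.items := by
  obtain ⟨hitems, hpkeys, hnd, hprops⟩ := h
  have hvkeys : visited.keys = order := hitems
  rw [PySem.Dict.items_foldl_insert_fresh order (fun n => n)
      (fun n => (walkB parent (parent.size + 1) (some n) []).reverse) PySem.Dict.empty
      (fun a _ => PySem.Dict.contains_empty a) (by simpa using hnd)]
  have hempty : (PySem.Dict.empty : PySem.Dict Int (List Int)).items = [] := rfl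
  rw [hempty, List.nil_append]
  rw [PySem.Dict.items_eq_map_keys visited (hvkeys ▸ hnd) [], hvkeys]
  apply List.map_congr_left
  intro n hn
  have hnk : n ∈ visited.keys := hvkeys ▸ hn
  obtain ⟨p, hmem⟩ : ∃ q, (n, q) ∈ visited.items := by
    obtain ⟨⟨a, q⟩, hm, hf⟩ := List.mem_map.mp hnk
    exact ⟨q, by obtain rfl : a = n := hf; exact hm⟩
  have hget : visited.getD n [] = p :=
    PySem.Dict.getD_of_mem_items visited hmem (hvkeys ▸ hnd) []
  obtain ⟨hcr, hhd, hndp, hsub, _⟩ := hprops n p hmem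
  cases hpr : p.reverse with
  | nil => rw [hpr] at hhd; simp at hhd
  | cons hd t =>
    rw [hpr] at hhd hcr
    have hdn : hd = n := by simpa using hhd
    rw [hdn] at hpr hcr
    have hlen : (n :: t).length ≤ parent.size + 1 := by
      have h1 : p.length ≤ order.length := (List.subperm_of_subset hndp hsub).length_le
      have h2 : order.length = parent.size := by
        rw [← hpkeys]; simp [PySem.Dict.keys, PySem.Dict.size]
      have h3 : (n :: t).length = p.length := by rw [← hpr, List.length_reverse]
      omega
    rw [walkB_chain parent t n (parent.size + 1) [] hcr hlen]
    simp only [List.nil_append, ← hpr, List.reverse_reverse, hget]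

-- lock-step simulation of the inner for-loop over a node's neighbours
lemma foldSim (node : Int) (path : List Int) (l : List Int) :
    ∀ (visited : PySem.Dict Int (List Int)) (parent : PySem.Dict Int (Option Int))
      (depth : PySem.Dict Int Int) (order : List Int)
      (qA : List (Int × List Int)) (qB : List Int),
      InvS visited parent depth order → InvQ visited qA qB →
      visited.get? node = some path →
      depth.getD node 0 = (path.length : Int) →
      InvS (l.foldl
          (fun (acc : PySem.Dict Int (List Int) × List (Int × List Int)) neighbor =>
            if acc.1.contains neighbor then acc
            else (acc.1.insert neighbor (path ++ [neighbor]),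
                  acc.2 ++ [(neighbor, path ++ [neighbor])])) (visited, qA)).1
        (l.foldl
          (fun (acc : (PySem.Dict Int (Option Int) × PySem.Dict Int Int × List Int) × List Int) nb =>
            if acc.1.1.contains nb then acc
            else ((acc.1.1.insert nb (some node),
                   acc.1.2.1.insert nb (acc.1.2.1.getD node 0 + 1),
                   acc.1.2.2 ++ [nb]),
                  acc.2 ++ [nb])) ((parent, depth, order), qB)).1.1
        (l.foldl
          (fun (acc : (PySem.Dict Int (Option Int) × PySem.Dict Int Int × List Int) × List Int) nb =>
            if acc.1.1.contains nb then acc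
            else ((acc.1.1.insert nb (some node),
                   acc.1.2.1.insert nb (acc.1.2.1.getD node 0 + 1),
                   acc.1.2.2 ++ [nb]),
                  acc.2 ++ [nb])) ((parent, depth, order), qB)).1.2.1
        (l.foldl
          (fun (acc : (PySem.Dict Int (Option Int) × PySem.Dict Int Int × List Int) × List Int) nb =>
            if acc.1.1.contains nb then acc
            else ((acc.1.1.insert nb (some node),
                   acc.1.2.1.insert nb (acc.1.2.1.getD node 0 + 1),
                   acc.1.2.2 ++ [nb]),
                  acc.2 ++ [nb])) ((parent, depth, order), qB)).1.2.2 ∧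
      InvQ (l.foldl
          (fun (acc : PySem.Dict Int (List Int) × List (Int × List Int)) neighbor =>
            if acc.1.contains neighbor then acc
            else (acc.1.insert neighbor (path ++ [neighbor]),
                  acc.2 ++ [(neighbor, path ++ [neighbor])])) (visited, qA)).1
        (l.foldl
          (fun (acc : PySem.Dict Int (List Int) × List (Int × List Int)) neighbor =>
            if acc.1.contains neighbor then acc
            else (acc.1.insert neighbor (path ++ [neighbor]),
                  acc.2 ++ [(neighbor, path ++ [neighbor])])) (visited, qA)).2
        (l.foldl
          (fun (acc : (PySem.Dict Int (Option Int) × PySem.Dict Int Int × List Int) × List Int) nb =>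
            if acc.1.1.contains nb then acc
            else ((acc.1.1.insert nb (some node),
                   acc.1.2.1.insert nb (acc.1.2.1.getD node 0 + 1),
                   acc.1.2.2 ++ [nb]),
                  acc.2 ++ [nb])) ((parent, depth, order), qB)).2 := by
  induction l with
  | nil =>
    intro visited parent depth order qA qB hS hQ _ _
    exact ⟨hS, hQ⟩
  | cons nb l ih =>
    intro visited parent depth order qA qB hS hQ hget hdep
    obtain ⟨hitems, hpkeys, hnd, hprops⟩ := id hS
    have hvkeys : visited.keys = order := hitems
    have hcc : parent.contains nb = visited.contains nb := by
      rw [PySem.Dict.contains_eq_decide_mem_keys, PySem.Dict.contains_eq_decide_mem_keys,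
        hvkeys, hpkeys]
    simp only [List.foldl_cons]
    by_cases h : visited.contains nb = true
    · rw [if_pos h, if_pos (hcc.trans h)]
      exact ih visited parent depth order qA qB hS hQ hget hdep
    · have h' : visited.contains nb = false := by simpa using h
      rw [if_neg (by simp [h']), if_neg (by simp [hcc, h'])]
      have hnbo : nb ∉ order := by
        intro hmem
        have := PySem.Dict.contains_eq_decide_mem_keys visited nb
        rw [h', hvkeys] at this
        simp [hmem] at this
      have hmemnode : (node, path) ∈ visited.items :=
        PySem.Dict.mem_items_of_get?_eq_some visited hget
      have hnodeo : node ∈ order := hvkeys ▸ PySem.Dict.mem_keys_of_mem_items visited hmemnode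
      have hnodene : node ≠ nb := fun e => hnbo (e ▸ hnodeo)
      obtain ⟨hcrN, hhdN, hndpN, hsubN, _⟩ := hprops node path hmemnode
      have hitems' : (visited.insert nb (path ++ [nb])).items
          = visited.items ++ [(nb, path ++ [nb])] :=
        PySem.Dict.items_insert_of_not_contains visited _ h'
      have hpc : parent.contains nb = false := hcc.trans h'
      apply ih
      · -- InvS of the inserted states
        refine ⟨?_, ?_, ?_, ?_⟩
        · rw [hitems']; simp [hitems]
        · rw [PySem.Dict.keys_insert_of_not_contains parent _ hpc, hpkeys]
        · refine List.Nodup.append hnd (by simp) ?_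
          intro a ha hb
          rw [List.mem_singleton] at hb
          exact hnbo (hb ▸ ha)
        · intro n p hmem
          rw [hitems'] at hmem
          rcases List.mem_append.mp hmem with hold | hnew
          · obtain ⟨hcr, hhd, hndp, hsub, hdp⟩ := hprops n p hold
            have hne : n ≠ nb :=
              fun e => hnbo (e ▸ hvkeys ▸ PySem.Dict.mem_keys_of_mem_items visited hold)
            refine ⟨chainrev_insert parent nb (some node) p.reverse hcr
              (fun x hx e => hnbo (e ▸ hsub x (List.mem_reverse.mp hx))), hhd, hndp,
              fun x hx => List.mem_append_left _ (hsub x hx), ?_⟩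
            rw [PySem.Dict.getD_insert_of_ne depth _ _ hne]
            exact hdp
          · have hn1 : n = nb ∧ p = path ++ [nb] := by
              simpa [Prod.ext_iff] using hnew
            rw [hn1.1, hn1.2]
            have hrev : (path ++ [nb]).reverse = nb :: path.reverse := by simp
            refine ⟨?_, ?_, ?_, ?_, ?_⟩
            · rw [hrev]
              cases hpr : path.reverse with
              | nil => rw [hpr] at hhdN; simp at hhdN
              | cons hd t =>
                rw [hpr] at hhdN hcrN
                have hdn : hd = node := by simpa using hhdN
                rw [hdn] at hcrN
                rw [hdn]
                simp only [ChainRev]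
                refine ⟨PySem.Dict.get?_insert_self parent nb (some node), ?_⟩
                exact chainrev_insert parent nb (some node) (node :: t) hcrN
                  (fun x hx e => hnbo (e ▸ hsubN x (List.mem_reverse.mp (by rw [hpr, hdn]; exact hx))))
            · rw [hrev]; rfl
            · refine List.Nodup.append hndpN (by simp) ?_
              intro a ha hb
              rw [List.mem_singleton] at hb
              exact hnbo (hb ▸ hsubN a ha)
            · intro x hx
              rcases List.mem_append.mp hx with hx | hx
              · exact List.mem_append_left _ (hsubN x hx)
              · simp at hx; simp [hx]
            · rw [PySem.Dict.getD_insert_self, hdep]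
              simp only [List.length_append, List.length_cons, List.length_nil]
              push_cast
              ring
      · -- InvQ of the extended queues
        obtain ⟨hq1, hq2⟩ := hQ
        refine ⟨by simp [hq1], ?_⟩
        intro m q hm
        rcases List.mem_append.mp hm with hold | hnew
        · have hg := hq2 m q hold
          have hne : m ≠ nb := by
            intro e
            apply hnbo
            rw [← e, ← hvkeys]
            exact PySem.Dict.mem_keys_of_mem_items visited
              (PySem.Dict.mem_items_of_get?_eq_some visited hg)
          rw [PySem.Dict.get?_insert_of_ne visited _ hne]
          exact hg
        · have hm1 : m = nb ∧ q = path ++ [nb] := by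
            simpa [Prod.ext_iff] using hnew
          rw [hm1.1, hm1.2]
          exact PySem.Dict.get?_insert_self visited nb _
      · rw [PySem.Dict.get?_insert_of_ne visited _ hnodene]
        exact hget
      · rw [PySem.Dict.getD_insert_of_ne depth _ _ hnodene]
        exact hdep

-- lock-step simulation of the two while loops
lemma goEq (g : PySem.Dict Int (List Int)) (md : Int) :
    ∀ (fuel : Nat) (visited : PySem.Dict Int (List Int)) (parent : PySem.Dict Int (Option Int))
      (depth : PySem.Dict Int Int) (order : List Int)
      (qA : List (Int × List Int)) (qB : List Int),
      InvS visited parent depth order → InvQ visited qA qB →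
      InvS (goA g md fuel visited qA)
        (goB g md fuel parent depth order qB).1
        (goB g md fuel parent depth order qB).2.1
        (goB g md fuel parent depth order qB).2.2 := by
  intro fuel
  induction fuel with
  | zero =>
    intro visited parent depth order qA qB hS hQ
    simpa only [goA, goB] using hS
  | succ f ih =>
    intro visited parent depth order qA qB hS hQ
    obtain ⟨hq1, hq2⟩ := hQ
    cases qA with
    | nil =>
      obtain rfl : qB = [] := by simpa using hq1.symm
      simpa only [goA, goB] using hS
    | cons hdA restA =>
      obtain ⟨node, path⟩ := hdA
      obtain rfl : qB = node :: restA.map Prod.fst := by simpa using hq1.symm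
      have hget : visited.get? node = some path := hq2 node path List.mem_cons_self
      have hmemnode : (node, path) ∈ visited.items :=
        PySem.Dict.mem_items_of_get?_eq_some visited hget
      obtain ⟨hs1, hs2, hs3, hs4⟩ := id hS
      have hdep : depth.getD node 0 = (path.length : Int) :=
        (hs4 node path hmemnode).2.2.2.2
      have hQrest : InvQ visited restA (restA.map Prod.fst) := by
        unfold InvQ
        exact ⟨rfl, fun n p hm => hq2 n p (List.mem_cons_of_mem _ hm)⟩
      simp only [goA, goB, hdep]
      split_ifs with hcond
      · exact ih visited parent depth order restA (restA.map Prod.fst) hS hQrest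
      · obtain ⟨hS', hQ'⟩ :=
          foldSim node path (g.getD node []) visited parent depth order restA
            (restA.map Prod.fst) hS hQrest hget hdep
        exact ih _ _ _ _ _ _ hS' hQ'

-- the two fuel bounds coincide: both count total adjacency size plus one
lemma pvFuel_eq (graph : List (Int × List Int)) : pvFuelB graph = pvFuelA graph := by
  unfold pvFuelA pvFuelB
  rw [PySem.List.foldl_add_nat]
  simp [List.length_flatMap]

-- the initial states of the two loops are related
lemma init_InvS (start : Int) :
    InvS (PySem.Dict.empty.insert start [start]) (PySem.Dict.empty.insert start none)
      (PySem.Dict.empty.insert start 1) [start] := by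
  unfold InvS
  refine ⟨?_, ?_, by simp, ?_⟩
  · rw [PySem.Dict.items_insert_of_not_contains _ _ (PySem.Dict.contains_empty start)]; rfl
  · rw [PySem.Dict.keys_insert_of_not_contains _ _ (PySem.Dict.contains_empty start)]; rfl
  · intro n p hmem
    rw [PySem.Dict.items_insert_of_not_contains _ _ (PySem.Dict.contains_empty start)] at hmem
    have hm0 : (n, p) = (start, [start]) := by
      simpa [show (PySem.Dict.empty : PySem.Dict Int (List Int)).items = [] from rfl] using hmem
    injection hm0 with hm1 hm2
    rw [hm1, hm2]
    refine ⟨?_, by simp, by simp, by simp, ?_⟩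
    · simp only [List.reverse_singleton, ChainRev]
      exact PySem.Dict.get?_insert_self _ start none
    · rw [PySem.Dict.getD_insert_self]; rfl

-- ===== VERDICT (by name: the statement is the Claim_ definition above) =====
theorem find_all_paths_bfs_py_spec : Claim_equal_find_all_paths_bfs_py := by
  intro start graph md _
  unfold Spec_find_all_paths_bfs_py find_all_paths_bfs_py find_all_paths_bfs_py_alt
  dsimp only
  rw [pvFuel_eq]
  have hQ : InvQ (PySem.Dict.empty.insert start [start]) [(start, [start])] [start] := by
    unfold InvQ
    refine ⟨rfl, ?_⟩
    intro n p hm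
    have hm1 : n = start ∧ p = [start] := by simpa [Prod.ext_iff] using hm
    rw [hm1.1, hm1.2]
    exact PySem.Dict.get?_insert_self _ start _
  have h := goEq (PySem.Dict.ofList graph) md (pvFuelA graph)
    (PySem.Dict.empty.insert start [start]) (PySem.Dict.empty.insert start none)
    (PySem.Dict.empty.insert start 1) [start] [(start, [start])] [start]
    (init_InvS start) hQ
  exact (reconstruct_eq _ _ _ _ h).symm
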